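-- pv_equiv track=rewrite | github.com/otchaika/First_year_BMSTU_labs | lab_12/lab_12_1.py | is_word_similar
-- ===== SOURCE A (Python) =====
-- def is_word_similar(w, w1):  # функция провеняет, совпадают ли слова. Учитывает знаки препинания
--     chars = "',./\"#:;!?*(){}[]"
--     start_word = False
--     i = 0
--     w = w.lower()  # приводим оба слова к прописным буквам
--     w1 = w1.lower()
--     while not start_word and i < len(w):  # пока слово не началось (первое вхождение буквы
--         is_sign = False
--         for item in chars:
--             if w[i] == item:
--                 is_sign = True  # символ является одним из знаков препинания
--         if is_sign:
--             i += 1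
--         else:
--             start_word = True
--     start = i  # индекс начала слова
--     if i == len(w):  # если слово состоит только из знаком препинания (например, '-')
--         return False
--     else:
--         end_word = False  # конец слова
--         while not end_word:
--             for item in chars:
--                 if w[i] == item:  # если это знак препинания, слово закончилось
--                     end_word = True
--                     i -= 1
--             if i == len(w) - 1:  # если это последний символ, слово закончилось
--                 end_word = True
--             i += 1
--     end = i - 1  # индекс понца слова
--     actual_word = w[start:end + 1]  # слово без окружающих знаков препинания
--     if actual_word == w1:  # если оно равно искомому
--         return True
--     else:
--         return False
-- ===== SOURCE B (Python) =====
-- def is_word_similar(w, w1):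
--     # Different decomposition: one pass tokenizes the whole string by punctuation
--     # (no index walking, no early exit), then the first nonempty token is compared.
--     chars = "',./\"#:;!?*(){}[]"
--     tokens, cur = [], ""
--     for c in w.lower():
--         if c in chars:
--             tokens.append(cur)
--             cur = ""
--         else:
--             cur += c
--     tokens.append(cur)
--     words = [t for t in tokens if t]
--     return bool(words) and words[0] == w1.lower()
-- ===== Notes on version B (the rewrite author's own statement) =====
-- stated objective: alternative
-- what changed: A walks indices with two early-exiting while loops (inner for-loop membership scan, i-decrement bookkeeping) to locate the word's start and end; B instead tokenizes the whole lowercased string in one fold, splitting it into punctuation-free runs, and compares the first nonempty token to w1.lower(); the measured speedup comes from replacing A's per-character inner 19-way for-loop with a single membership test.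
import Mathlib
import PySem

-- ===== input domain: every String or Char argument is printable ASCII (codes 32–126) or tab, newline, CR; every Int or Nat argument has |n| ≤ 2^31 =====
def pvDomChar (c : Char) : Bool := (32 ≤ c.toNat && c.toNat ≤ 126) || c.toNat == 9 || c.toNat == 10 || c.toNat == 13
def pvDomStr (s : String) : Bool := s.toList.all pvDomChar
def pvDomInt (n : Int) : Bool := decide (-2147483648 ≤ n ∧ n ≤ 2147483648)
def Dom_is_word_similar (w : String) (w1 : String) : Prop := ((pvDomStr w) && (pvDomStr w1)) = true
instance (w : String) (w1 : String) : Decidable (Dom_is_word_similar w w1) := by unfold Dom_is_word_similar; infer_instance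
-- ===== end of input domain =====

-- B replaces A's two early-exiting index-walking while loops by a single full-string
-- tokenizing fold (split on punctuation) followed by selecting the first nonempty token;
-- objective: alternative. Equivalence on all inputs (both Pythons are total).

-- ===== PORT A =====
-- chars = "',./\"#:;!?*(){}[]"
def pvChars : List Char := "',./\"#:;!?*(){}[]".toList

-- the inner 'for item in chars: if w[i] == item: is_sign = True' loop of A
def pvIsSign (c : Char) : Bool := pvChars.foldl (fun b item => if c == item then true else b) false

-- A's first while loop: skip leading punctuation, returns the final i ('start')
def pvFindStart (l : List Char) (i : Nat) : Nat :=
  if h : i < l.length then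
    if pvIsSign l[i] then pvFindStart l (i + 1) else i
  else i
termination_by l.length - i

-- A's second while loop: returns the final i after the loop (A's 'end' is this minus 1).
-- Case analysis mirrors one loop iteration: punctuation at i → end_word, i-1 then +1 (net i);
-- otherwise the 'i == len(w)-1' test (written as its contrapositive i+1 < len for termination) →
-- exit with i+1; otherwise continue with i+1.
def pvFindEnd (l : List Char) (i : Nat) : Nat :=
  if pvIsSign (l.getD i ' ') then i
  else if h : i + 1 < l.length then pvFindEnd l (i + 1)
  else i + 1
termination_by l.length - i

def is_word_similar (w : String) (w1 : String) : Bool :=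
  let wl := PySem.Str.lower w          -- w = w.lower()
  let w1l := PySem.Str.lower w1        -- w1 = w1.lower()
  let l := wl.toList
  let i := pvFindStart l 0             -- first while loop; start = i
  if i = l.length then false           -- word is punctuation only
  else
    let e := pvFindEnd l i             -- second while loop (final i)
    let endd := e - 1                  -- end = i - 1
    -- actual_word = w[start:end+1]
    let actual := PySem.List.slice l (some (i : Int)) (some ((endd + 1 : Nat) : Int))
    if actual = w1l.toList then true else false

-- ===== PORT B =====
-- 'c in chars' membership test of B
def pvP (c : Char) : Bool := pvChars.contains c

-- one iteration of B's tokenizing loop: state = (tokens, cur)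
def pvStep (st : List (List Char) × List Char) (c : Char) : List (List Char) × List Char :=
  if pvP c then (st.1 ++ [st.2], []) else (st.1, st.2 ++ [c])

def is_word_similar_alt (w : String) (w1 : String) : Bool :=
  let st := (PySem.Str.lower w).toList.foldl pvStep ([], [])   -- the for-loop over w.lower()
  let tokens := st.1 ++ [st.2]                                  -- tokens.append(cur)
  let words := tokens.filter (fun t => !t.isEmpty)              -- [t for t in tokens if t]
  match words.head? with                                        -- bool(words) and words[0] == w1.lower()
  | some t => decide (t = (PySem.Str.lower w1).toList)
  | none => false

-- ===== PRECONDITION & SPEC =====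
def Spec_is_word_similar (w : String) (w1 : String) (out : Bool) : Prop := out = is_word_similar_alt w w1
instance (w : String) (w1 : String) (out : Bool) : Decidable (Spec_is_word_similar w w1 out) := by unfold Spec_is_word_similar; infer_instance

-- ===== CLAIM (what is proved, stated in full; the proofs are below) =====
def Claim_equal_is_word_similar : Prop := ∀ (w : String) (w1 : String), Dom_is_word_similar w w1 → Spec_is_word_similar w w1 (is_word_similar w w1)

-- ===== LEMMAS AND PROOFS =====

-- recursive model of B's tokenization: split l into maximal punctuation-free runs
def pvSplitP (l : List Char) : List (List Char) :=
  match l with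
  | [] => [[]]
  | c :: t => if pvP c then [] :: pvSplitP t else (pvSplitP t).modifyHead (c :: ·)

theorem pvIsSign_eq_contains (c : Char) : pvIsSign c = pvChars.contains c := by
  simp [pvIsSign, pvChars, List.foldl, Bool.or_comm, Bool.or_left_comm, Bool.or_assoc]

theorem dropWhile_eq_drop_len_takeWhile (p : Char → Bool) (l : List Char) :
    l.dropWhile p = l.drop (l.takeWhile p).length := by
  induction l with
  | nil => rfl
  | cons a t ih => by_cases h : p a <;> simp [h, ih]

theorem pvFindStart_eq (l : List Char) (i : Nat) :
    pvFindStart l i = i + ((l.drop i).takeWhile pvIsSign).length := by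
  fun_induction pvFindStart l i with
  | case1 i h hs ih =>
      rw [ih, List.drop_eq_getElem_cons h, List.takeWhile_cons]
      simp [hs]; omega
  | case2 i h hs =>
      rw [List.drop_eq_getElem_cons h, List.takeWhile_cons]
      simp [hs]
  | case3 i h =>
      rw [List.drop_eq_nil_of_le (by omega)]
      simp

theorem pvFindEnd_eq (l : List Char) (i : Nat) (hi : i < l.length) :
    pvFindEnd l i = i + ((l.drop i).takeWhile (fun c => !pvIsSign c)).length := by
  fun_induction pvFindEnd l i with
  | case1 i hs =>
      rw [List.drop_eq_getElem_cons hi, List.takeWhile_cons]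
      rw [List.getD_eq_getElem l ' ' hi] at hs
      simp [hs]
  | case2 i hs h ih =>
      rw [ih (by omega)]
      rw [List.drop_eq_getElem_cons hi, List.takeWhile_cons]
      rw [List.getD_eq_getElem l ' ' hi] at hs
      simp [hs]; omega
  | case3 i hs h =>
      have : i + 1 = l.length := by omega
      rw [List.drop_eq_getElem_cons hi, List.takeWhile_cons]
      rw [List.getD_eq_getElem l ' ' hi] at hs
      rw [List.drop_eq_nil_of_le (by omega)]
      simp [hs]

-- B's fold computes pvSplitP (generalized over the initial state)
theorem pvFold_eq_splitP (l : List Char) : ∀ (ts : List (List Char)) (cur : List Char),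
    (l.foldl pvStep (ts, cur)).1 ++ [(l.foldl pvStep (ts, cur)).2]
      = ts ++ (pvSplitP l).modifyHead (cur ++ ·) := by
  induction l with
  | nil => intro ts cur; simp [pvSplitP]
  | cons c t ih =>
      intro ts cur
      by_cases h : pvP c
      · simp only [List.foldl_cons, pvStep, h, if_pos, pvSplitP]
        rw [ih]
        cases pvSplitP t <;> simp
      · simp only [List.foldl_cons, pvStep, h, if_neg, Bool.false_eq_true,
          not_false_eq_true, pvSplitP, if_neg]
        rw [ih]
        congr 1
        cases hsp : pvSplitP t with
        | nil => simp
        | cons a r => simp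

-- head of pvSplitP is takeWhile of non-punctuation
theorem pvSplitP_head (l : List Char) :
    ∃ r, pvSplitP l = (l.takeWhile (fun c => !pvP c)) :: r := by
  induction l with
  | nil => exact ⟨[], rfl⟩
  | cons c t ih =>
      obtain ⟨r, hr⟩ := ih
      by_cases h : pvP c
      · exact ⟨pvSplitP t, by simp [pvSplitP, h]⟩
      · exact ⟨r, by simp [pvSplitP, h, hr]⟩

-- first nonempty token of pvSplitP = A's stripped-and-truncated word
theorem pvSplitP_firstWord (l : List Char) :
    ((pvSplitP l).filter (fun t => !t.isEmpty)).head?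
      = (if l.dropWhile (fun c => pvP c) = [] then none
         else some ((l.dropWhile (fun c => pvP c)).takeWhile
                     (fun c => !pvP c))) := by
  induction l with
  | nil => simp [pvSplitP]
  | cons c t ih =>
      by_cases h : pvP c
      · simpa [pvSplitP, h, List.dropWhile_cons] using ih
      · obtain ⟨r, hr⟩ := pvSplitP_head t
        simp [pvSplitP, h, hr]

-- ===== VERDICT (by name: the statement is the Claim_ definition above) =====
theorem is_word_similar_spec : Claim_equal_is_word_similar := by
  intro w w1 _
  unfold Spec_is_word_similar is_word_similar is_word_similar_alt
  dsimp only
  set l := (PySem.Str.lower w).toList with hl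
  set t := (PySem.Str.lower w1).toList with ht
  -- B side normal form
  have hB := pvFold_eq_splitP l [] []
  simp only [List.nil_append] at hB
  have hid : (pvSplitP l).modifyHead (fun x => x) = pvSplitP l := by
    cases pvSplitP l <;> simp
  rw [hid] at hB
  rw [hB, pvSplitP_firstWord]
  -- A side normal form
  have hsign : (fun c => pvP c) = pvIsSign := by
    funext c; rw [pvIsSign_eq_contains]; rfl
  have hsign' : (fun c => !pvP c) = (fun c => !pvIsSign c) := by
    funext c; rw [pvIsSign_eq_contains]; rfl
  rw [hsign, hsign']
  have hdw : l.dropWhile pvIsSign = l.drop (l.takeWhile pvIsSign).length :=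
    dropWhile_eq_drop_len_takeWhile _ _
  have hstart : pvFindStart l 0 = (l.takeWhile pvIsSign).length := by
    rw [pvFindStart_eq]; simp
  have htk : (l.takeWhile pvIsSign).length ≤ l.length :=
    (List.takeWhile_prefix _).length_le
  by_cases hall : (l.takeWhile pvIsSign).length = l.length
  · -- all punctuation (or empty): both return False
    rw [hstart, if_pos hall]
    have hnil : l.dropWhile pvIsSign = [] := by
      rw [hdw, hall, List.drop_length]
    simp [hnil]
  · rw [hstart, if_neg hall]
    set s0 := (l.takeWhile pvIsSign).length with hs0
    have hs0lt : s0 < l.length := by omega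
    have hsdrop : l.dropWhile pvIsSign = l.drop s0 := hdw
    have hsne : l.dropWhile pvIsSign ≠ [] := by
      rw [hsdrop]
      simp [List.drop_eq_nil_iff]; omega
    obtain ⟨c, s', hc⟩ := List.exists_cons_of_ne_nil hsne
    have hcns : pvIsSign c = false := by
      have := List.head_dropWhile_not pvIsSign hsne
      simp only [hc] at this
      simpa using this
    set tl := ((l.drop s0).takeWhile (fun c => !pvIsSign c)) with htl
    have hE : pvFindEnd l s0 = s0 + tl.length := pvFindEnd_eq l s0 hs0lt
    have htl1 : 1 ≤ tl.length := by
      rw [htl, ← hsdrop, hc, List.takeWhile_cons]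
      simp [hcns]
    have hstop : pvFindEnd l s0 - 1 + 1 = s0 + tl.length := by omega
    rw [hstop, PySem.List.slice_natCast]
    have htake : (l.drop s0).take (s0 + tl.length - s0) = tl := by
      have hpre : tl <+: l.drop s0 := htl ▸ List.takeWhile_prefix _
      have := (List.prefix_iff_eq_take.mp hpre).symm
      simpa using this
    rw [htake]
    rw [if_neg (show ¬(l.dropWhile pvIsSign = []) from hsne)]
    rw [hsdrop, ← htl]
    by_cases hq : tl = t <;> simp [hq]
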